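-- pv_equiv track=rewrite | github.com/huytq000605/CF-CP | Codeforces Round #826 (Div. 3)/D.py | solve
-- ===== SOURCE A (Python) =====
-- import math
--
-- def solve(n, nums):
--     def dfs(start, end, mn, mx):
--         result = 0
--         if start >= end:
--             return 0
--         mid = start + (end - start) // 2
--         mid_num = mn + (mx - mn) // 2
--
--         right_bigger = nums[end] > nums[start]
--         for i in range(mid+1, end+1):
--             if right_bigger and nums[i] <= mid_num:
--                 return math.inf
--             if not right_bigger and nums[i] > mid_num:
--                 return math.inf
--         if right_bigger:
--             result += dfs(start, mid, mn, mid_num)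
--             result += dfs(mid+1, end, mid_num+1, mx)
--             return result
--         else:
--             result += dfs(start, mid, mid_num+1, mx)
--             result += dfs(mid+1, end, mn, mid_num)
--             return result + 1
--     result = dfs(0, n-1, 1, n)
--     if result == math.inf:
--         return -1
--     return result
-- ===== SOURCE B (Python) =====
-- def solve(n, nums):
--     if n < 2:
--         return 0
--     def rec(start, end, mn, mx):
--         # returns (reversal count or None if invalid, segment min, segment max)
--         if start >= end:
--             v = nums[start]
--             return (0, v, v)
--         mid = start + (end - start) // 2
--         mid_num = mn + (mx - mn) // 2
--         if nums[end] > nums[start]: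
--             lc, lmn, lmx = rec(start, mid, mn, mid_num)
--             rc, rmn, rmx = rec(mid + 1, end, mid_num + 1, mx)
--             ok = rmn > mid_num
--             extra = 0
--         else:
--             lc, lmn, lmx = rec(start, mid, mid_num + 1, mx)
--             rc, rmn, rmx = rec(mid + 1, end, mn, mid_num)
--             ok = rmx <= mid_num
--             extra = 1
--         cnt = lc + rc + extra if ok and lc is not None and rc is not None else None
--         return (cnt, min(lmn, rmn), max(lmx, rmx))
--     c = rec(0, n - 1, 1, n)[0]
--     return -1 if c is None else c
-- ===== Notes on version B (the rewrite author's own statement) =====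
-- stated objective: alternative
-- what changed: B recurses children first and returns each segment's (count, min, max), validating every node with a single comparison of the child min/max against mid_num instead of A's per-node scan of the right half; the trade is that B always visits the whole tree while A can exit early on invalid input.
import Mathlib
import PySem

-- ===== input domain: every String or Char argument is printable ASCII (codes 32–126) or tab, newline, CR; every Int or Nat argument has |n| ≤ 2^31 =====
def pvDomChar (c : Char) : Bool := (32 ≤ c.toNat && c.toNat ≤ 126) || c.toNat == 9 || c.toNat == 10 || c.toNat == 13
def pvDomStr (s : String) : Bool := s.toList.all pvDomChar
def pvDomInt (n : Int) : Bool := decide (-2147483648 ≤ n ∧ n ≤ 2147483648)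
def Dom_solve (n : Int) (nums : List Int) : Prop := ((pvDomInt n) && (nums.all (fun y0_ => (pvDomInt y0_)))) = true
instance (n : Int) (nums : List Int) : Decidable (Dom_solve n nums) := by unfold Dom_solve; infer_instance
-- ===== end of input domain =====

-- B replaces A's per-node scan of the right half with segment min/max values combined
-- bottom-up by the recursion itself, so each node is validated by one comparison
-- (B gives up A's early exit on invalid inputs); return values agree wherever A returns.

-- shared midpoint arithmetic 'a + (b - a) // 2' (used verbatim by both Pythons)
def pyMid (a b : Int) : Int := a + PySem.Int.floordiv (b - a) 2

-- bounds needed for termination of both ports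
theorem pyMid_bounds {a b : Int} (h : a < b) : a ≤ pyMid a b ∧ pyMid a b < b := by
  unfold pyMid
  rw [PySem.Int.floordiv_eq_ediv_of_pos (by norm_num)]
  omega

-- ===== PORT A =====
-- the 'for i in range(mid+1, end+1)' loop with its two early 'return math.inf' exits
-- (true = some index triggers the inf return)
def solveScanA (nums : List Int) (idxs : List Int) (rightBigger : Bool) (midNum : Int) : Bool :=
  match idxs with
  | [] => false
  | i :: rest =>
    if rightBigger && decide (PySem.List.pyGetD nums i 0 ≤ midNum) then true
    else if !rightBigger && decide (midNum < PySem.List.pyGetD nums i 0) then true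
    else solveScanA nums rest rightBigger midNum

-- dfs(start, end, mn, mx); 'none' is Python's math.inf result. Indexing is via pyGetD,
-- exact under Pre_solve (all indices used are in range there).
def solveDfsA (nums : List Int) (start stop mn mx : Int) : Option Int :=
  if _h : start ≥ stop then some 0
  else
    let mid := pyMid start stop
    let midNum := pyMid mn mx
    let rightBigger : Bool := decide (PySem.List.pyGetD nums stop 0 > PySem.List.pyGetD nums start 0)
    if solveScanA nums (PySem.List.pyRange (mid + 1) (stop + 1) 1) rightBigger midNum then none
    else if rightBigger then
      match solveDfsA nums start mid mn midNum, solveDfsA nums (mid + 1) stop (midNum + 1) mx with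
      | some a, some b => some (a + b)
      | _, _ => none
    else
      match solveDfsA nums start mid (midNum + 1) mx, solveDfsA nums (mid + 1) stop mn midNum with
      | some a, some b => some (a + b + 1)
      | _, _ => none
termination_by (stop - start).toNat
decreasing_by
  · have := pyMid_bounds (show start < stop by omega); omega
  · have := pyMid_bounds (show start < stop by omega); omega
  · have := pyMid_bounds (show start < stop by omega); omega
  · have := pyMid_bounds (show start < stop by omega); omega

def solve (n : Int) (nums : List Int) : Int :=
  match solveDfsA nums 0 (n - 1) 1 n with
  | none => -1
  | some c => c

-- ===== PORT B =====
-- rec(start, end, mn, mx) -> (count-or-None, segment min, segment max), children first,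
-- then an O(1) check of the child min/max against mid_num instead of a scan.
def solveRecB (nums : List Int) (start stop mn mx : Int) : Option Int × Int × Int :=
  if _h : start ≥ stop then
    let v := PySem.List.pyGetD nums start 0
    (some 0, v, v)
  else
    let mid := pyMid start stop
    let midNum := pyMid mn mx
    if PySem.List.pyGetD nums stop 0 > PySem.List.pyGetD nums start 0 then
      let l := solveRecB nums start mid mn midNum
      let r := solveRecB nums (mid + 1) stop (midNum + 1) mx
      let cnt : Option Int :=
        if midNum < r.2.1 then
          match l.1, r.1 with
          | some a, some b => some (a + b)
          | _, _ => none
        else none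
      (cnt, min l.2.1 r.2.1, max l.2.2 r.2.2)
    else
      let l := solveRecB nums start mid (midNum + 1) mx
      let r := solveRecB nums (mid + 1) stop mn midNum
      let cnt : Option Int :=
        if r.2.2 ≤ midNum then
          match l.1, r.1 with
          | some a, some b => some (a + b + 1)
          | _, _ => none
        else none
      (cnt, min l.2.1 r.2.1, max l.2.2 r.2.2)
termination_by (stop - start).toNat
decreasing_by
  · have := pyMid_bounds (show start < stop by omega); omega
  · have := pyMid_bounds (show start < stop by omega); omega
  · have := pyMid_bounds (show start < stop by omega); omega
  · have := pyMid_bounds (show start < stop by omega); omega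

def solve_alt (n : Int) (nums : List Int) : Int :=
  if n < 2 then 0
  else
    match (solveRecB nums 0 (n - 1) 1 n).1 with
    | none => -1
    | some c => c

-- ===== PRECONDITION & SPEC =====
-- Pre_ excludes exactly the inputs on which A raises IndexError (n ≥ 2 with fewer than n elements);
-- A returns on every other input.
def Pre_solve (n : Int) (nums : List Int) : Prop := 2 ≤ n → n ≤ (nums.length : Int)
instance (n : Int) (nums : List Int) : Decidable (Pre_solve n nums) := by unfold Pre_solve; infer_instance
def pvWitness_solve : Int × List Int := (2, [2, 1])

def Spec_solve (n : Int) (nums : List Int) (out : Int) : Prop := out = solve_alt n nums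
instance (n : Int) (nums : List Int) (out : Int) : Decidable (Spec_solve n nums out) := by unfold Spec_solve; infer_instance

-- ===== CLAIM (what is proved, stated in full; the proofs are below) =====
def Claim_equal_solve : Prop := ∀ (n : Int) (nums : List Int), Dom_solve n nums → Pre_solve n nums → Spec_solve n nums (solve n nums)

-- ===== LEMMAS AND PROOFS =====

-- the values a segment [s, e] holds, as both programs read them
def segVals (nums : List Int) (s e : Int) : List Int :=
  (PySem.List.pyRange s (e + 1) 1).map (fun i => PySem.List.pyGetD nums i 0)

-- min / max of a nonempty list, as the bottom-up recursion accumulates them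
def listMin : List Int → Int
  | [] => 0
  | x :: xs => xs.foldl min x

def listMax : List Int → Int
  | [] => 0
  | x :: xs => xs.foldl max x


theorem segVals_split (nums : List Int) {s m e : Int} (h1 : s ≤ m) (h2 : m ≤ e) :
    segVals nums s e = segVals nums s m ++ segVals nums (m + 1) e := by
  unfold segVals
  rw [PySem.List.pyRange_one_append s (m + 1) (e + 1) (by omega) (by omega), List.map_append]

theorem segVals_self (nums : List Int) (s : Int) :
    segVals nums s s = [PySem.List.pyGetD nums s 0] := by
  unfold segVals
  rw [PySem.List.pyRange_one_singleton]
  rfl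

theorem segVals_ne_nil (nums : List Int) {s e : Int} (h : s ≤ e) : segVals nums s e ≠ [] := by
  unfold segVals
  rw [PySem.List.pyRange_one_cons (by omega)]
  simp

theorem foldl_min_le_iff (m : Int) : ∀ (xs : List Int) (x : Int),
    xs.foldl min x ≤ m ↔ x ≤ m ∨ ∃ v ∈ xs, v ≤ m := by
  intro xs
  induction xs with
  | nil => simp
  | cons y ys ih =>
    intro x
    simp only [List.foldl_cons, ih, min_le_iff, List.mem_cons]
    aesop

theorem lt_foldl_max_iff (m : Int) : ∀ (xs : List Int) (x : Int),
    m < xs.foldl max x ↔ m < x ∨ ∃ v ∈ xs, m < v := by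
  intro xs
  induction xs with
  | nil => simp
  | cons y ys ih =>
    intro x
    simp only [List.foldl_cons, ih, lt_max_iff, List.mem_cons]
    aesop

theorem listMin_le_iff {l : List Int} (h : l ≠ []) (m : Int) :
    listMin l ≤ m ↔ ∃ v ∈ l, v ≤ m := by
  match l with
  | x :: xs =>
    show xs.foldl min x ≤ m ↔ _
    rw [foldl_min_le_iff]
    simp

theorem lt_listMax_iff {l : List Int} (h : l ≠ []) (m : Int) :
    m < listMax l ↔ ∃ v ∈ l, m < v := by
  match l with
  | x :: xs =>
    show m < xs.foldl max x ↔ _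
    rw [lt_foldl_max_iff]
    simp

theorem foldl_min_comm : ∀ (ys : List Int) (x y : Int),
    List.foldl min (min x y) ys = min x (List.foldl min y ys) := by
  intro ys
  induction ys with
  | nil => simp
  | cons z zs ih =>
    intro x y
    simp only [List.foldl_cons, min_assoc, ih]

theorem foldl_max_comm : ∀ (ys : List Int) (x y : Int),
    List.foldl max (max x y) ys = max x (List.foldl max y ys) := by
  intro ys
  induction ys with
  | nil => simp
  | cons z zs ih =>
    intro x y
    simp only [List.foldl_cons, max_assoc, ih]

theorem listMin_append {l r : List Int} (hl : l ≠ []) (hr : r ≠ []) :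
    listMin (l ++ r) = min (listMin l) (listMin r) := by
  match l, r with
  | a :: l', b :: r' =>
    show List.foldl min a (l' ++ b :: r') = min (List.foldl min a l') (List.foldl min b r')
    rw [List.foldl_append, List.foldl_cons]
    exact foldl_min_comm r' _ b

theorem listMax_append {l r : List Int} (hl : l ≠ []) (hr : r ≠ []) :
    listMax (l ++ r) = max (listMax l) (listMax r) := by
  match l, r with
  | a :: l', b :: r' =>
    show List.foldl max a (l' ++ b :: r') = max (List.foldl max a l') (List.foldl max b r')
    rw [List.foldl_append, List.foldl_cons]
    exact foldl_max_comm r' _ b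

theorem scan_true (nums : List Int) (m : Int) : ∀ idxs : List Int,
    solveScanA nums idxs true m
      = (idxs.map (fun i => PySem.List.pyGetD nums i 0)).any (fun v => decide (v ≤ m)) := by
  intro idxs
  induction idxs with
  | nil => simp [solveScanA]
  | cons i rest ih =>
    rw [solveScanA]
    by_cases h : PySem.List.pyGetD nums i 0 ≤ m <;> simp [h, ih]

theorem scan_false (nums : List Int) (m : Int) : ∀ idxs : List Int,
    solveScanA nums idxs false m
      = (idxs.map (fun i => PySem.List.pyGetD nums i 0)).any (fun v => decide (m < v)) := by
  intro idxs
  induction idxs with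
  | nil => simp [solveScanA]
  | cons i rest ih =>
    rw [solveScanA]
    by_cases h : m < PySem.List.pyGetD nums i 0 <;> simp [h, ih]

theorem any_le_eq_decide {l : List Int} (h : l ≠ []) (m : Int) :
    (l.any (fun v => decide (v ≤ m))) = decide (listMin l ≤ m) := by
  by_cases hx : listMin l ≤ m
  · rw [decide_eq_true hx]
    obtain ⟨v, hv, hle⟩ := (listMin_le_iff h m).mp hx
    exact List.any_eq_true.mpr ⟨v, hv, by simpa⟩
  · rw [decide_eq_false hx]
    refine List.any_eq_false.mpr ?_
    intro v hv hle
    exact hx ((listMin_le_iff h m).mpr ⟨v, hv, by simpa using hle⟩)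

theorem any_lt_eq_decide {l : List Int} (h : l ≠ []) (m : Int) :
    (l.any (fun v => decide (m < v))) = decide (m < listMax l) := by
  by_cases hx : m < listMax l
  · rw [decide_eq_true hx]
    obtain ⟨v, hv, hlt⟩ := (lt_listMax_iff h m).mp hx
    exact List.any_eq_true.mpr ⟨v, hv, by simpa⟩
  · rw [decide_eq_false hx]
    refine List.any_eq_false.mpr ?_
    intro v hv hlt
    exact hx ((lt_listMax_iff h m).mpr ⟨v, hv, by simpa using hlt⟩)

-- main invariant: B's recursion returns exactly (A's dfs, segment min, segment max)
theorem recB_eq_dfsA (nums : List Int) : ∀ (k : Nat) (start stop mn mx : Int),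
    (stop - start).toNat = k → start ≤ stop →
    solveRecB nums start stop mn mx
      = (solveDfsA nums start stop mn mx, listMin (segVals nums start stop), listMax (segVals nums start stop)) := by
  intro k
  induction k using Nat.strong_induction_on with
  | _ k ih =>
    intro start stop mn mx hk hle
    by_cases hse : start ≥ stop
    · have heq : start = stop := le_antisymm hle hse
      subst heq
      rw [solveRecB, solveDfsA]
      simp [segVals_self, listMin, listMax]
    · have hlt : start < stop := by omega
      obtain ⟨hm1, hm2⟩ := pyMid_bounds hlt
      have IHl : ∀ a b : Int, solveRecB nums start (pyMid start stop) a b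
          = (solveDfsA nums start (pyMid start stop) a b,
             listMin (segVals nums start (pyMid start stop)),
             listMax (segVals nums start (pyMid start stop))) := by
        intro a b
        exact ih (pyMid start stop - start).toNat (by omega) start (pyMid start stop) a b rfl (by omega)
      have IHr : ∀ a b : Int, solveRecB nums (pyMid start stop + 1) stop a b
          = (solveDfsA nums (pyMid start stop + 1) stop a b,
             listMin (segVals nums (pyMid start stop + 1) stop),
             listMax (segVals nums (pyMid start stop + 1) stop)) := by
        intro a b
        exact ih (stop - (pyMid start stop + 1)).toNat (by omega) (pyMid start stop + 1) stop a b rfl (by omega)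
      have hsplit := segVals_split nums (show start ≤ pyMid start stop from hm1) (show pyMid start stop ≤ stop by omega)
      have hlnil := segVals_ne_nil nums (show start ≤ pyMid start stop from hm1)
      have hrnil := segVals_ne_nil nums (show pyMid start stop + 1 ≤ stop by omega)
      rw [solveRecB, solveDfsA]
      simp only [dif_neg hse, IHl, IHr]
      by_cases hrb : PySem.List.pyGetD nums stop 0 > PySem.List.pyGetD nums start 0
      · simp only [if_pos hrb, decide_eq_true hrb]
        rw [scan_true,
          show (PySem.List.pyRange (pyMid start stop + 1) (stop + 1) 1).map
              (fun i => PySem.List.pyGetD nums i 0) = segVals nums (pyMid start stop + 1) stop from rfl,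
          any_le_eq_decide hrnil]
        by_cases hex : listMin (segVals nums (pyMid start stop + 1) stop) ≤ pyMid mn mx
        · simp [hex, not_lt.mpr hex, hsplit, listMin_append hlnil hrnil, listMax_append hlnil hrnil]
        · simp [hex, not_le.mp hex, hsplit, listMin_append hlnil hrnil, listMax_append hlnil hrnil]
      · simp only [if_neg hrb, decide_eq_false hrb]
        rw [scan_false,
          show (PySem.List.pyRange (pyMid start stop + 1) (stop + 1) 1).map
              (fun i => PySem.List.pyGetD nums i 0) = segVals nums (pyMid start stop + 1) stop from rfl,
          any_lt_eq_decide hrnil]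
        by_cases hex : pyMid mn mx < listMax (segVals nums (pyMid start stop + 1) stop)
        · simp [hex, not_le.mpr hex, hsplit, listMin_append hlnil hrnil, listMax_append hlnil hrnil]
        · simp [hex, not_lt.mp hex, hsplit, listMin_append hlnil hrnil, listMax_append hlnil hrnil]

-- ===== VERDICT (by name: the statement is the Claim_ definition above) =====
theorem solve_spec : Claim_equal_solve := by
  intro n nums _ _
  unfold Spec_solve solve solve_alt
  by_cases h : n < 2
  · rw [solveDfsA]
    simp [show (0:Int) ≥ n - 1 by omega, h]
  · rw [recB_eq_dfsA nums (n - 1 - 0).toNat 0 (n - 1) 1 n rfl (by omega)]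
    simp [h]
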